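-- pv_equiv track=rewrite | github.com/foolishzhao/leetcode | python3/0700/_0777_Swap_Adjacent_in_LR_String/main.py | canTransform
-- ===== SOURCE A (Python) =====
-- def canTransform(start: str, end: str) -> bool:
--     A = [(s, i) for i, s in enumerate(start) if s in ('L', 'R')]
--     B = [(e, i) for i, e in enumerate(end) if e in ('L', 'R')]
--
--     if len(A) != len(B):
--         return False
--
--     for (s, i), (e, j) in zip(A, B):
--         if s != e:
--             return False
--         if s == 'L':
--             if i < j:
--                 return False
--         if s == 'R':
--             if i > j:
--                 return False
--     return True
-- ===== SOURCE B (Python) =====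
-- def canTransform(start: str, end: str) -> bool:
--     if [c for c in start if c == 'L' or c == 'R'] != [c for c in end if c == 'L' or c == 'R']:
--         return False
--     ls = le = rs = re = 0
--     for k in range(max(len(start), len(end))):
--         if k < len(start):
--             if start[k] == 'L':
--                 ls += 1
--             elif start[k] == 'R':
--                 rs += 1
--         if k < len(end):
--             if end[k] == 'L':
--                 le += 1
--             elif end[k] == 'R':
--                 re += 1
--         if ls > le or rs < re:
--             return False
--     return True
-- ===== Notes on version B (the rewrite author's own statement) =====
-- stated objective: alternative
-- what changed: Replaced A's paired (char,index) lists with per-pair index comparisons by the invariant-based counting algorithm: compare the L/R character subsequences, then one lockstep pass maintaining four running L/R counters and checking the prefix invariants ls<=le and rs>=re, with no index values or matched-pair comparisons at all.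
import Mathlib
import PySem

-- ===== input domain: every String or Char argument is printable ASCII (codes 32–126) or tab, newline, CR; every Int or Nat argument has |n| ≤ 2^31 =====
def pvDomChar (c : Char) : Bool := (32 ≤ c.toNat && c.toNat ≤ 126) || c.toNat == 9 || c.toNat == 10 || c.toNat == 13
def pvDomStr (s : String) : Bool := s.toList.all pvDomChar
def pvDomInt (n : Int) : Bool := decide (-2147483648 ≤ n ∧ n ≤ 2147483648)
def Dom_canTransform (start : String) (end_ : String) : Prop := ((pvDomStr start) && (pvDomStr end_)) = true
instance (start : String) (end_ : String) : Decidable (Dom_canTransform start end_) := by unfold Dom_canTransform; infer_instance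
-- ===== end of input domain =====

-- B replaces A's matched (char,index) pair lists and per-pair index comparisons by the
-- invariant-based counting algorithm: equal L/R subsequences + four running prefix counters.

-- ===== PORT A =====
-- the zip-loop of A, step for step
def pvCheck : List ((Char × Int) × (Char × Int)) → Bool
  | [] => true
  | ((s, i), (e, j)) :: rest =>
    if s ≠ e then false
    else if s = 'L' ∧ i < j then false
    else if s = 'R' ∧ i > j then false
    else pvCheck rest

def canTransform (start : String) (end_ : String) : Bool :=
  let A := ((PySem.List.enumerate start.toList 0).filter
              (fun p => p.2 == 'L' || p.2 == 'R')).map (fun p => (p.2, p.1))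
  let B := ((PySem.List.enumerate end_.toList 0).filter
              (fun p => p.2 == 'L' || p.2 == 'R')).map (fun p => (p.2, p.1))
  if A.length ≠ B.length then false
  else pvCheck (A.zip B)

-- ===== PORT B =====
-- the "if …[k]=='L': …+=1 elif …[k]=='R': …+=1" counter update of Source B
def pvBump (c : Char) (l r : Int) : Int × Int :=
  if c = 'L' then (l + 1, r) else if c = 'R' then (l, r + 1) else (l, r)

-- the "for k in range(max(len(start), len(end)))" loop of Source B over the four counters:
-- the k-th characters are the heads of the remaining suffixes; a side past its length
-- (k ≥ len) is the exhausted, empty suffix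
def pvLoop : List Char → List Char → Int → Int → Int → Int → Bool
  | [], [], _, _, _, _ => true
  | a :: s, [], ls, le, rs, re =>
    let p := pvBump a ls rs
    if p.1 > le ∨ p.2 < re then false else pvLoop s [] p.1 le p.2 re
  | [], b :: e, ls, le, rs, re =>
    let q := pvBump b le re
    if ls > q.1 ∨ rs < q.2 then false else pvLoop [] e ls q.1 rs q.2
  | a :: s, b :: e, ls, le, rs, re =>
    let p := pvBump a ls rs
    let q := pvBump b le re
    if p.1 > q.1 ∨ p.2 < q.2 then false else pvLoop s e p.1 q.1 p.2 q.2

-- the list comprehension [c for c in … if c == 'L' or c == 'R']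
def pvFiltChars (l : List Char) : List Char := l.filter (fun c => c = 'L' ∨ c = 'R')

def canTransform_alt (start : String) (end_ : String) : Bool :=
  if pvFiltChars start.toList ≠ pvFiltChars end_.toList then false
  else pvLoop start.toList end_.toList 0 0 0 0

-- ===== PRECONDITION & SPEC =====
def Spec_canTransform (start : String) (end_ : String) (out : Bool) : Prop := out = canTransform_alt start end_
instance (start : String) (end_ : String) (out : Bool) : Decidable (Spec_canTransform start end_ out) := by unfold Spec_canTransform; infer_instance

-- ===== CLAIM (what is proved, stated in full; the proofs are below) =====
def Claim_equal_canTransform : Prop := ∀ (start : String) (end_ : String), Dom_canTransform start end_ → Spec_canTransform start end_ (canTransform start end_)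

-- ===== LEMMAS AND PROOFS =====

-- the filtered (char, index) list A builds
def filtIdx : List Char → Int → List (Char × Int)
  | [], _ => []
  | c :: rest, i => if c = 'L' ∨ c = 'R' then (c, i) :: filtIdx rest (i + 1) else filtIdx rest (i + 1)

-- positions of character c, starting at offset i0
def idxs (c : Char) : List Char → Int → List Int
  | [], _ => []
  | a :: rest, i => if a = c then i :: idxs c rest (i + 1) else idxs c rest (i + 1)

-- number of occurrences of c, as an Int
def cntc (c : Char) (l : List Char) : Int := ((l.filter (fun a => a = c)).length : Int)

-- the prefix-counter condition Source B's loop checks after step k-1 (prefixes of length k)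
def pvCond (s e : List Char) (ls le rs re : Int) (k : Nat) : Prop :=
  ls + cntc 'L' (s.take k) ≤ le + cntc 'L' (e.take k) ∧
  re + cntc 'R' (e.take k) ≤ rs + cntc 'R' (s.take k)

theorem filtIdx_eq_A_list : ∀ (l : List Char) (s : Int),
    ((PySem.List.enumerate l s).filter (fun p => p.2 == 'L' || p.2 == 'R')).map
      (fun p => (p.2, p.1)) = filtIdx l s
  | [], s => by simp [PySem.List.enumerate_nil, filtIdx]
  | c :: rest, s => by
    simp only [PySem.List.enumerate_cons, List.filter_cons, filtIdx]
    by_cases h : c = 'L' ∨ c = 'R'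
    · have hb : ((s, c).2 == 'L' || (s, c).2 == 'R') = true := by
        rcases h with h | h <;> simp [h]
      simp [hb, filtIdx_eq_A_list rest (s + 1), h]
    · have h' : c ≠ 'L' ∧ c ≠ 'R' := by
        constructor <;> intro hc <;> exact h (by simp [hc])
      have hb : ((s, c).2 == 'L' || (s, c).2 == 'R') = false := by
        simp [h'.1, h'.2]
      simp [hb, filtIdx_eq_A_list rest (s + 1), h]

theorem map_fst_filtIdx : ∀ (l : List Char) (i : Int),
    (filtIdx l i).map Prod.fst = pvFiltChars l
  | [], _ => rfl
  | c :: rest, i => by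
    simp only [filtIdx, pvFiltChars, List.filter_cons]
    by_cases h : c = 'L' ∨ c = 'R' <;>
      simp [h, map_fst_filtIdx rest (i + 1), pvFiltChars]

theorem pvCheck_iff : ∀ (l : List ((Char × Int) × (Char × Int))),
    pvCheck l = true ↔ ∀ p ∈ l,
      p.1.1 = p.2.1 ∧ (p.1.1 = 'L' → p.2.2 ≤ p.1.2) ∧ (p.1.1 = 'R' → p.1.2 ≤ p.2.2)
  | [] => by simp [pvCheck]
  | ((s, i), (e, j)) :: rest => by
    simp only [pvCheck, List.forall_mem_cons]
    split_ifs with h1 h2 h3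
    · simp only [false_iff]; intro h; exact h1 h.1.1
    · simp only [false_iff]; intro h
      have := h.1.2.1 h2.1; omega
    · simp only [false_iff]; intro h
      have := h.1.2.2 h3.1; omega
    · rw [pvCheck_iff rest]
      constructor
      · intro hr
        refine ⟨⟨not_not.mp h1, ?_, ?_⟩, hr⟩
        · intro hL; by_contra hc; exact h2 ⟨hL, by omega⟩
        · intro hR; by_contra hc; exact h3 ⟨hR, by omega⟩
      · exact fun h => h.2

theorem idxs_ge (c : Char) : ∀ (l : List Char) (i0 : Int), ∀ v ∈ idxs c l i0, i0 ≤ v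
  | [], _ => by simp [idxs]
  | a :: rest, i0 => by
    simp only [idxs]
    split
    · intro v hv
      rcases List.mem_cons.mp hv with rfl | h
      · omega
      · have := idxs_ge c rest (i0 + 1) v h; omega
    · intro v hv
      have := idxs_ge c rest (i0 + 1) v hv; omega

theorem idxs_sorted (c : Char) : ∀ (l : List Char) (i0 : Int), (idxs c l i0).Pairwise (· ≤ ·)
  | [], _ => by simp [idxs]
  | a :: rest, i0 => by
    simp only [idxs]
    split
    · refine List.pairwise_cons.mpr ⟨?_, idxs_sorted c rest (i0 + 1)⟩
      intro v hv; have := idxs_ge c rest (i0 + 1) v hv; omega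
    · exact idxs_sorted c rest (i0 + 1)

theorem cntc_cons (c a : Char) (l : List Char) :
    cntc c (a :: l) = (if a = c then 1 else 0) + cntc c l := by
  simp only [cntc, List.filter_cons]
  split <;> rename_i h
  · have h' : a = c := by simpa using h
    simp [h']; ring
  · have h' : ¬ a = c := by simpa using h
    simp [h']

theorem cntc_nil (c : Char) : cntc c [] = 0 := rfl

theorem idxs_length_nat (c : Char) : ∀ (l : List Char) (i0 : Int),
    (idxs c l i0).length = (l.filter (fun a => a = c)).length
  | [], _ => rfl
  | a :: rest, i0 => by
    simp only [idxs, List.filter_cons]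
    by_cases h : a = c <;> simp [h, idxs_length_nat c rest (i0 + 1)]

theorem idxs_length (c : Char) (l : List Char) (i0 : Int) :
    ((idxs c l i0).length : Int) = cntc c l := by
  rw [idxs_length_nat]; rfl

theorem cnt_take_eq_countP (c : Char) : ∀ (l : List Char) (i0 : Int) (k : Nat),
    cntc c (l.take k) = ((idxs c l i0).countP (fun v => v < i0 + k) : Int)
  | [], i0, k => by simp [idxs, cntc]
  | a :: rest, i0, k => by
    cases k with
    | zero =>
      simp only [List.take_zero, Nat.cast_zero, add_zero]
      have h0 : ∀ v ∈ idxs c (a :: rest) i0, ¬ (decide (v < i0) = true) := by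
        intro v hv
        have := idxs_ge c (a :: rest) i0 v hv
        simp; omega
      rw [List.countP_eq_zero.mpr h0]
      simp [cntc]
    | succ k' =>
      have ih := cnt_take_eq_countP c rest (i0 + 1) k'
      have heq : i0 + 1 + (k' : Int) = i0 + ((k' : Int) + 1) := by ring
      rw [heq] at ih
      simp only [List.take_succ_cons, cntc_cons, idxs, Nat.cast_add, Nat.cast_one]
      by_cases h : a = c
      · rw [if_pos h, if_pos h, List.countP_cons]
        have hp : (decide (i0 < i0 + ((k' : Int) + 1))) = true := by
          simp only [decide_eq_true_eq]; omega
        rw [hp, ih]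
        push_cast; simp; ring
      · rw [if_neg h, if_neg h, ih]
        ring

theorem countP_lt_cons (x : Int) (xs : List Int) (k : Int) :
    ((x :: xs).countP (fun v => v < k)) =
      (if x < k then 1 else 0) + xs.countP (fun v => v < k) := by
  rw [List.countP_cons]
  by_cases h : x < k <;> simp [h] <;> omega

theorem count_pointwise_fwd : ∀ (xs ys : List Int), xs.Pairwise (· ≤ ·) → ys.Pairwise (· ≤ ·) →
    (∀ k : Int, xs.countP (fun v => v < k) ≤ ys.countP (fun v => v < k)) →
    ∀ x y : Int, (x, y) ∈ xs.zip ys → y ≤ x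
  | [], _, _, _, _ => by simp
  | _ :: _, [], _, _, _ => by simp
  | x :: xs, y :: ys, hxs, hys, h => by
    have hxt := (List.pairwise_cons.mp hxs).2
    have hyt := (List.pairwise_cons.mp hys).2
    have hxh := (List.pairwise_cons.mp hxs).1
    have hyh := (List.pairwise_cons.mp hys).1
    have hhead : y ≤ x := by
      have h1 := h (x + 1)
      rw [countP_lt_cons, countP_lt_cons] at h1
      rw [if_pos (by omega)] at h1
      by_contra hc
      rw [if_neg (by omega)] at h1
      have : ys.countP (fun v => v < x + 1) = 0 := by
        apply List.countP_eq_zero.mpr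
        intro v hv
        have := hyh v hv
        simp only [decide_eq_true_eq]; omega
      omega
    have htail : ∀ k : Int, xs.countP (fun v => v < k) ≤ ys.countP (fun v => v < k) := by
      intro k
      by_cases hk : k ≤ x
      · have : xs.countP (fun v => v < k) = 0 := by
          apply List.countP_eq_zero.mpr
          intro v hv
          have := hxh v hv
          simp only [decide_eq_true_eq]; omega
        omega
      · have h1 := h k
        rw [countP_lt_cons, countP_lt_cons, if_pos (by omega), if_pos (by omega)] at h1
        omega
    intro a b hab
    rcases (by simpa using hab : (a = x ∧ b = y) ∨ (a, b) ∈ xs.zip ys) with ⟨rfl, rfl⟩ | hm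
    · exact hhead
    · exact count_pointwise_fwd xs ys hxt hyt htail a b hm

theorem count_pointwise_bwd : ∀ (xs ys : List Int), xs.length = ys.length →
    (∀ x y : Int, (x, y) ∈ xs.zip ys → y ≤ x) → ∀ k : Int,
    xs.countP (fun v => v < k) ≤ ys.countP (fun v => v < k)
  | [], [], _, _, _ => by simp
  | x :: xs, y :: ys, hl, h, k => by
    have hhead : y ≤ x := h x y (by simp)
    have ih := count_pointwise_bwd xs ys (by simpa using hl)
      (fun a b hab => h a b (List.mem_cons_of_mem _ hab)) k
    rw [countP_lt_cons, countP_lt_cons]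
    by_cases hx : x < k
    · rw [if_pos hx, if_pos (by omega)]; omega
    · rw [if_neg hx]
      split <;> omega

theorem count_iff_pointwise (xs ys : List Int) (hxs : xs.Pairwise (· ≤ ·))
    (hys : ys.Pairwise (· ≤ ·)) (hl : xs.length = ys.length) :
    (∀ k : Int, xs.countP (fun v => v < k) ≤ ys.countP (fun v => v < k)) ↔
    (∀ x y : Int, (x, y) ∈ xs.zip ys → y ≤ x) :=
  ⟨count_pointwise_fwd xs ys hxs hys, count_pointwise_bwd xs ys hl⟩

theorem pvBump_fst (a : Char) (ls rs : Int) :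
    (pvBump a ls rs).1 = ls + (if a = 'L' then 1 else 0) := by
  unfold pvBump; split_ifs with h1 h2 <;> simp_all

theorem pvBump_snd (a : Char) (ls rs : Int) :
    (pvBump a ls rs).2 = rs + (if a = 'R' then 1 else 0) := by
  unfold pvBump; split_ifs with h1 h2 <;> simp_all

theorem pvLoop_iff : ∀ (s e : List Char) (ls le rs re : Int),
    ls + cntc 'L' s = le + cntc 'L' e → rs + cntc 'R' s = re + cntc 'R' e →
    (pvLoop s e ls le rs re = true ↔ ∀ k : Nat, 1 ≤ k → pvCond s e ls le rs re k)
  | [], [], ls, le, rs, re => by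
    intro hL hR
    simp only [cntc_nil] at hL hR
    simp only [pvLoop, true_iff, pvCond, List.take_nil, cntc_nil]
    intro k _
    constructor <;> omega
  | a :: s, [], ls, le, rs, re => by
    intro hL hR
    simp only [cntc_cons, cntc_nil] at hL hR
    simp only [pvLoop]
    have hp1 := pvBump_fst a ls rs
    have hp2 := pvBump_snd a ls rs
    by_cases hv : (pvBump a ls rs).1 > le ∨ (pvBump a ls rs).2 < re
    · rw [if_pos hv]
      simp only [Bool.false_eq_true, false_iff, not_forall]
      refine ⟨1, by omega, ?_⟩
      simp only [pvCond, List.take_succ_cons, List.take_zero, List.take_nil, cntc_cons, cntc_nil]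
      rw [hp1, hp2] at hv
      intro hc; rcases hc with ⟨h1, h2⟩
      rcases hv with hv | hv <;> [skip; skip] <;> split_ifs at * <;> omega
    · rw [if_neg hv]
      rw [pvLoop_iff s [] (pvBump a ls rs).1 le (pvBump a ls rs).2 re
            (by rw [hp1, cntc_nil]; omega) (by rw [hp2, cntc_nil]; omega)]
      constructor
      · intro h k hk
        cases k with
        | zero => omega
        | succ k' =>
          simp only [pvCond, List.take_succ_cons, List.take_nil, cntc_cons, cntc_nil] at *
          cases Nat.eq_zero_or_pos k' with
          | inl h0 =>
            subst h0
            rw [hp1, hp2] at hv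
            simp only [List.take_zero, cntc_nil]
            constructor <;> (split_ifs at * <;> omega)
          | inr hpos =>
            have := h k' hpos
            simp only [pvCond, List.take_nil, cntc_nil] at this
            rw [hp1, hp2] at this
            constructor <;> omega
      · intro h k hk
        have := h (k + 1) (by omega)
        simp only [pvCond, List.take_succ_cons, List.take_nil, cntc_cons, cntc_nil] at *
        rw [hp1, hp2]
        constructor <;> omega
  | [], b :: e, ls, le, rs, re => by
    intro hL hR
    simp only [cntc_cons, cntc_nil] at hL hR
    simp only [pvLoop]
    have hq1 := pvBump_fst b le re
    have hq2 := pvBump_snd b le re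
    by_cases hv : ls > (pvBump b le re).1 ∨ rs < (pvBump b le re).2
    · rw [if_pos hv]
      simp only [Bool.false_eq_true, false_iff, not_forall]
      refine ⟨1, by omega, ?_⟩
      simp only [pvCond, List.take_succ_cons, List.take_zero, List.take_nil, cntc_cons, cntc_nil]
      rw [hq1, hq2] at hv
      intro hc; rcases hc with ⟨h1, h2⟩
      rcases hv with hv | hv <;> [skip; skip] <;> split_ifs at * <;> omega
    · rw [if_neg hv]
      rw [pvLoop_iff [] e ls (pvBump b le re).1 rs (pvBump b le re).2
            (by rw [hq1, cntc_nil]; omega) (by rw [hq2, cntc_nil]; omega)]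
      constructor
      · intro h k hk
        cases k with
        | zero => omega
        | succ k' =>
          simp only [pvCond, List.take_succ_cons, List.take_nil, cntc_cons, cntc_nil] at *
          cases Nat.eq_zero_or_pos k' with
          | inl h0 =>
            subst h0
            rw [hq1, hq2] at hv
            simp only [List.take_zero, cntc_nil]
            constructor <;> (split_ifs at * <;> omega)
          | inr hpos =>
            have := h k' hpos
            simp only [pvCond, List.take_nil, cntc_nil] at this
            rw [hq1, hq2] at this
            constructor <;> omega
      · intro h k hk
        have := h (k + 1) (by omega)
        simp only [pvCond, List.take_succ_cons, List.take_nil, cntc_cons, cntc_nil] at *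
        rw [hq1, hq2]
        constructor <;> omega
  | a :: s, b :: e, ls, le, rs, re => by
    intro hL hR
    simp only [cntc_cons, cntc_nil] at hL hR
    simp only [pvLoop]
    have hp1 := pvBump_fst a ls rs
    have hp2 := pvBump_snd a ls rs
    have hq1 := pvBump_fst b le re
    have hq2 := pvBump_snd b le re
    by_cases hv : (pvBump a ls rs).1 > (pvBump b le re).1 ∨ (pvBump a ls rs).2 < (pvBump b le re).2
    · rw [if_pos hv]
      simp only [Bool.false_eq_true, false_iff, not_forall]
      refine ⟨1, by omega, ?_⟩
      simp only [pvCond, List.take_succ_cons, List.take_zero, cntc_cons, cntc_nil]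
      rw [hp1, hp2] at hv; rw [hq1, hq2] at hv
      intro hc; rcases hc with ⟨h1, h2⟩
      rcases hv with hv | hv <;> [skip; skip] <;> split_ifs at * <;> omega
    · rw [if_neg hv]
      rw [pvLoop_iff s e (pvBump a ls rs).1 (pvBump b le re).1 (pvBump a ls rs).2 (pvBump b le re).2
            (by rw [hp1, hq1]; omega) (by rw [hp2, hq2]; omega)]
      constructor
      · intro h k hk
        cases k with
        | zero => omega
        | succ k' =>
          simp only [pvCond, List.take_succ_cons, cntc_cons] at *
          cases Nat.eq_zero_or_pos k' with
          | inl h0 =>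
            subst h0
            rw [hp1, hp2] at hv; rw [hq1, hq2] at hv
            simp only [List.take_zero, cntc_nil]
            constructor <;> (split_ifs at * <;> omega)
          | inr hpos =>
            have := h k' hpos
            simp only [pvCond] at this
            rw [hp1, hp2, hq1, hq2] at this
            constructor <;> omega
      · intro h k hk
        have := h (k + 1) (by omega)
        simp only [pvCond, List.take_succ_cons, cntc_cons] at *
        rw [hp1, hp2, hq1, hq2]
        constructor <;> omega

theorem filtIdx_filter_idxs (c : Char) (hc : c = 'L' ∨ c = 'R') : ∀ (l : List Char) (i : Int),
    ((filtIdx l i).filter (fun p => p.1 = c)).map Prod.snd = idxs c l i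
  | [], _ => rfl
  | a :: rest, i => by
    simp only [filtIdx, idxs]
    by_cases h : a = 'L' ∨ a = 'R'
    · rw [if_pos h]
      by_cases hac : a = c
      · simp [hac, filtIdx_filter_idxs c hc rest (i + 1)]
      · simp [hac, filtIdx_filter_idxs c hc rest (i + 1)]
    · have hac : ¬ a = c := by rcases hc with rfl | rfl <;> tauto
      simp [h, hac, filtIdx_filter_idxs c hc rest (i + 1)]

theorem map_fst_eq_iff : ∀ (as bs : List (Char × Int)),
    as.map Prod.fst = bs.map Prod.fst ↔
      (as.length = bs.length ∧ ∀ p ∈ as.zip bs, p.1.1 = p.2.1)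
  | [], [] => by simp
  | [], b :: bs => by simp
  | a :: as, [] => by simp
  | a :: as, b :: bs => by
    simp only [List.map_cons, List.cons.injEq, List.length_cons, List.zip_cons_cons,
      List.forall_mem_cons, map_fst_eq_iff as bs]
    constructor
    · rintro ⟨h1, h2, h3⟩; exact ⟨by omega, h1, h3⟩
    · rintro ⟨h1, h2, h3⟩; exact ⟨h2, by omega, h3⟩

theorem mem_zip_swap : ∀ (l l' : List Int) (x y : Int),
    (x, y) ∈ l.zip l' ↔ (y, x) ∈ l'.zip l
  | [], _, _, _ => by simp
  | _ :: _, [], _, _ => by simp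
  | a :: l, b :: l', x, y => by
    simp only [List.zip_cons_cons, List.mem_cons, Prod.mk.injEq, mem_zip_swap l l' x y]
    tauto

theorem zip_cond_split : ∀ (as bs : List (Char × Int)),
    as.map Prod.fst = bs.map Prod.fst →
    ((∀ p ∈ as.zip bs, (p.1.1 = 'L' → p.2.2 ≤ p.1.2) ∧ (p.1.1 = 'R' → p.1.2 ≤ p.2.2)) ↔
      ((∀ x y : Int, (x, y) ∈ ((as.filter (fun p => p.1 = 'L')).map Prod.snd).zip
          ((bs.filter (fun p => p.1 = 'L')).map Prod.snd) → y ≤ x) ∧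
       (∀ x y : Int, (x, y) ∈ ((as.filter (fun p => p.1 = 'R')).map Prod.snd).zip
          ((bs.filter (fun p => p.1 = 'R')).map Prod.snd) → x ≤ y)))
  | [], bs, h => by
    have hb : bs = [] := List.map_eq_nil_iff.mp ((List.map_nil (f := Prod.fst)) ▸ h.symm)
    subst hb; simp
  | a :: as, [], h => by simp at h
  | a :: as, b :: bs, h => by
    obtain ⟨c, i⟩ := a; obtain ⟨d, j⟩ := b
    simp only [List.map_cons, List.cons.injEq] at h
    obtain ⟨hcd, htl⟩ := h
    subst hcd
    have ih := zip_cond_split as bs htl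
    by_cases hL : c = 'L'
    · subst hL
      rw [List.zip_cons_cons, List.forall_mem_cons, ih]
      simp only [List.filter_cons]
      norm_num
      rw [if_neg (by decide : ¬('L':Char) = 'R')]
      constructor
      · rintro ⟨⟨hh, -⟩, hLr, hRr⟩
        refine ⟨fun x y hxy => ?_, hRr⟩
        rcases hxy with ⟨rfl, rfl⟩ | hm
        · exact hh
        · exact hLr x y hm
      · rintro ⟨hLr, hRr⟩
        exact ⟨⟨hLr i j (Or.inl ⟨rfl, rfl⟩), fun hc => absurd hc (by decide)⟩,
          fun x y hm => hLr x y (Or.inr hm), hRr⟩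
    · by_cases hR : c = 'R'
      · subst hR
        rw [List.zip_cons_cons, List.forall_mem_cons, ih]
        simp only [List.filter_cons]
        norm_num
        rw [if_neg (by decide : ¬('R':Char) = 'L')]
        constructor
        · rintro ⟨⟨-, hh⟩, hLr, hRr⟩
          refine ⟨hLr, fun x y hxy => ?_⟩
          rcases hxy with ⟨rfl, rfl⟩ | hm
          · exact hh
          · exact hRr x y hm
        · rintro ⟨hLr, hRr⟩
          exact ⟨⟨fun hc => absurd hc (by decide), hRr i j (Or.inl ⟨rfl, rfl⟩)⟩,
            hLr, fun x y hm => hRr x y (Or.inr hm)⟩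
      · rw [List.zip_cons_cons, List.forall_mem_cons, ih]
        simp only [List.filter_cons]
        rw [if_neg (by simpa using hL), if_neg (by simpa using hL),
          if_neg (by simpa using hR), if_neg (by simpa using hR)]
        constructor
        · rintro ⟨-, hrest⟩; exact hrest
        · intro hrest
          exact ⟨⟨fun hc => absurd hc hL, fun hc => absurd hc hR⟩, hrest⟩

theorem cntc_filtChars (c : Char) (hc : c = 'L' ∨ c = 'R') (l : List Char) :
    cntc c (pvFiltChars l) = cntc c l := by
  unfold cntc pvFiltChars
  rw [List.filter_filter]
  congr 2
  apply List.filter_congr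
  intro a _
  by_cases h : a = c
  · subst h; rcases hc with h | h <;> simp [h]
  · simp [h]

theorem cnt_eq_of_filt_eq (s e : List Char) (h : pvFiltChars s = pvFiltChars e) :
    cntc 'L' s = cntc 'L' e ∧ cntc 'R' s = cntc 'R' e := by
  constructor
  · rw [← cntc_filtChars 'L' (Or.inl rfl) s, h, cntc_filtChars 'L' (Or.inl rfl) e]
  · rw [← cntc_filtChars 'R' (Or.inr rfl) s, h, cntc_filtChars 'R' (Or.inr rfl) e]

theorem prefix_iff_countP (c : Char) (s e : List Char) :
    (∀ k : Nat, 1 ≤ k → cntc c (s.take k) ≤ cntc c (e.take k)) ↔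
    (∀ K : Int, (idxs c s 0).countP (fun v => v < K) ≤ (idxs c e 0).countP (fun v => v < K)) := by
  constructor
  · intro h K
    by_cases hK : K ≤ 0
    · have hzs : (idxs c s 0).countP (fun v => v < K) = 0 := by
        apply List.countP_eq_zero.mpr
        intro v hv
        have := idxs_ge c s 0 v hv
        simp only [decide_eq_true_eq]; omega
      rw [hzs]; exact Nat.zero_le _
    · have hk1 : 1 ≤ K.toNat := by omega
      have hh := h K.toNat hk1
      rw [cnt_take_eq_countP c s 0 K.toNat, cnt_take_eq_countP c e 0 K.toNat] at hh
      have hKK : (0 : Int) + (K.toNat : Int) = K := by omega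
      rw [hKK] at hh
      exact_mod_cast hh
  · intro h k _
    have hh := h (k : Int)
    rw [cnt_take_eq_countP c s 0 k, cnt_take_eq_countP c e 0 k]
    have hKK : (0 : Int) + (k : Int) = (k : Int) := by omega
    rw [hKK]
    exact_mod_cast hh

theorem A_iff (start end_ : String) :
    canTransform start end_ = true ↔
      (pvFiltChars start.toList = pvFiltChars end_.toList ∧
       (∀ x y : Int, (x, y) ∈ (idxs 'L' start.toList 0).zip (idxs 'L' end_.toList 0) → y ≤ x) ∧
       (∀ x y : Int, (x, y) ∈ (idxs 'R' start.toList 0).zip (idxs 'R' end_.toList 0) → x ≤ y)) := by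
  unfold canTransform
  simp only [filtIdx_eq_A_list]
  by_cases hlen : (filtIdx start.toList 0).length = (filtIdx end_.toList 0).length
  · rw [if_neg (not_not_intro hlen), pvCheck_iff]
    constructor
    · intro h
      have hfst : ∀ p ∈ (filtIdx start.toList 0).zip (filtIdx end_.toList 0), p.1.1 = p.2.1 :=
        fun p hp => (h p hp).1
      have hmap : (filtIdx start.toList 0).map Prod.fst = (filtIdx end_.toList 0).map Prod.fst :=
        (map_fst_eq_iff _ _).mpr ⟨hlen, hfst⟩
      have hfe : pvFiltChars start.toList = pvFiltChars end_.toList := by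
        rw [← map_fst_filtIdx start.toList 0, ← map_fst_filtIdx end_.toList 0]; exact hmap
      have hsplit := (zip_cond_split _ _ hmap).mp (fun p hp => (h p hp).2)
      rw [filtIdx_filter_idxs 'L' (Or.inl rfl) start.toList 0,
        filtIdx_filter_idxs 'L' (Or.inl rfl) end_.toList 0,
        filtIdx_filter_idxs 'R' (Or.inr rfl) start.toList 0,
        filtIdx_filter_idxs 'R' (Or.inr rfl) end_.toList 0] at hsplit
      exact ⟨hfe, hsplit.1, hsplit.2⟩
    · rintro ⟨hfe, hLpt, hRpt⟩
      have hmap : (filtIdx start.toList 0).map Prod.fst = (filtIdx end_.toList 0).map Prod.fst := by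
        rw [map_fst_filtIdx, map_fst_filtIdx]; exact hfe
      intro p hp
      refine ⟨((map_fst_eq_iff _ _).mp hmap).2 p hp, ?_⟩
      refine (zip_cond_split _ _ hmap).mpr ?_ p hp
      rw [filtIdx_filter_idxs 'L' (Or.inl rfl) start.toList 0,
        filtIdx_filter_idxs 'L' (Or.inl rfl) end_.toList 0,
        filtIdx_filter_idxs 'R' (Or.inr rfl) start.toList 0,
        filtIdx_filter_idxs 'R' (Or.inr rfl) end_.toList 0]
      exact ⟨hLpt, hRpt⟩
  · rw [if_pos hlen]
    simp only [Bool.false_eq_true, false_iff]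
    rintro ⟨hfe, -, -⟩
    apply hlen
    have hmap : (filtIdx start.toList 0).map Prod.fst = (filtIdx end_.toList 0).map Prod.fst := by
      rw [map_fst_filtIdx, map_fst_filtIdx]; exact hfe
    have := congrArg List.length hmap
    simpa using this

theorem B_iff (start end_ : String) :
    canTransform_alt start end_ = true ↔
      (pvFiltChars start.toList = pvFiltChars end_.toList ∧
       (∀ K : Int, (idxs 'L' start.toList 0).countP (fun v => v < K) ≤
          (idxs 'L' end_.toList 0).countP (fun v => v < K)) ∧
       (∀ K : Int, (idxs 'R' end_.toList 0).countP (fun v => v < K) ≤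
          (idxs 'R' start.toList 0).countP (fun v => v < K))) := by
  unfold canTransform_alt
  by_cases hfe : pvFiltChars start.toList = pvFiltChars end_.toList
  · rw [if_neg (not_not_intro hfe)]
    obtain ⟨hLt, hRt⟩ := cnt_eq_of_filt_eq _ _ hfe
    rw [pvLoop_iff start.toList end_.toList 0 0 0 0 (by omega) (by omega)]
    simp only [pvCond, zero_add]
    constructor
    · intro h
      exact ⟨hfe, (prefix_iff_countP 'L' _ _).mp (fun k hk => (h k hk).1),
        (prefix_iff_countP 'R' _ _).mp (fun k hk => (h k hk).2)⟩
    · rintro ⟨-, hL, hR⟩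
      intro k hk
      exact ⟨(prefix_iff_countP 'L' _ _).mpr hL k hk,
        (prefix_iff_countP 'R' _ _).mpr hR k hk⟩
  · rw [if_pos hfe]
    simp only [Bool.false_eq_true, false_iff]
    rintro ⟨h, -, -⟩
    exact hfe h

-- ===== VERDICT (by name: the statement is the Claim_ definition above) =====
theorem canTransform_spec : Claim_equal_canTransform := by
  intro start end_ _
  unfold Spec_canTransform
  rw [Bool.eq_iff_iff, A_iff, B_iff]
  refine and_congr_right fun hfe => ?_
  obtain ⟨hLt, hRt⟩ := cnt_eq_of_filt_eq _ _ hfe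
  have hlenL : (idxs 'L' start.toList 0).length = (idxs 'L' end_.toList 0).length := by
    have h1 := idxs_length 'L' start.toList 0
    have h2 := idxs_length 'L' end_.toList 0
    omega
  have hlenR : (idxs 'R' end_.toList 0).length = (idxs 'R' start.toList 0).length := by
    have h1 := idxs_length 'R' start.toList 0
    have h2 := idxs_length 'R' end_.toList 0
    omega
  have hL := count_iff_pointwise (idxs 'L' start.toList 0) (idxs 'L' end_.toList 0)
    (idxs_sorted 'L' _ _) (idxs_sorted 'L' _ _) hlenL
  have hR := count_iff_pointwise (idxs 'R' end_.toList 0) (idxs 'R' start.toList 0)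
    (idxs_sorted 'R' _ _) (idxs_sorted 'R' _ _) hlenR
  have hswap : (∀ x y : Int, (x, y) ∈ (idxs 'R' start.toList 0).zip (idxs 'R' end_.toList 0) → x ≤ y) ↔
      (∀ x y : Int, (x, y) ∈ (idxs 'R' end_.toList 0).zip (idxs 'R' start.toList 0) → y ≤ x) := by
    constructor
    · intro h x y hm
      exact h y x ((mem_zip_swap _ _ y x).mpr hm)
    · intro h x y hm
      exact h y x ((mem_zip_swap _ _ x y).mp hm)
  exact and_congr hL.symm (hswap.trans hR.symm)
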